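-- pv_equiv track=rewrite | github.com/tabtoyou/mobius | src/mobius/cli/commands/setup.py | _upsert_codex_mcp_section
-- ===== SOURCE A (Python) =====
-- _CODEX_MCP_SECTION = """# Mobius MCP hookup for Codex CLI.
-- # Keep Mobius runtime settings and per-role model overrides in
-- # ~/.mobius/config.yaml (for example: clarification.default_model,
-- # llm.qa_model, evaluation.semantic_model, consensus.*).
-- # This file is only for the Codex MCP/env registration block.
--
-- [mcp_servers.mobius]
-- command = "uvx"
-- args = ["--from", "mobius-ai", "mobius", "mcp", "serve"]
--
-- [mcp_servers.mobius.env]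
-- MOBIUS_AGENT_RUNTIME = "codex"
-- MOBIUS_LLM_BACKEND = "codex"
-- """
--
-- _CODEX_MCP_COMMENT_LINES = (
--     "# Mobius MCP hookup for Codex CLI.",
--     "# Keep Mobius runtime settings and per-role model overrides in",
--     "# ~/.mobius/config.yaml (for example: clarification.default_model,",
--     "# llm.qa_model, evaluation.semantic_model, consensus.*).",
--     "# This file is only for the Codex MCP/env registration block.",
-- )
--
-- def _is_codex_mobius_table_header(line: str) -> bool:
--     """Return True when the line starts the managed Codex MCP table."""
--     return line == "[mcp_servers.mobius]" or line.startswith("[mcp_servers.mobius.")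
--
-- def _trim_managed_codex_comments(lines: list[str]) -> None:
--     """Remove the managed Codex comment block immediately before a table."""
--     while lines and not lines[-1].strip():
--         lines.pop()
--
--     comment_index = len(lines)
--     for expected in reversed(_CODEX_MCP_COMMENT_LINES):
--         if comment_index == 0 or lines[comment_index - 1] != expected:
--             return
--         comment_index -= 1
--
--     del lines[comment_index:]
--
-- def _upsert_codex_mcp_section(raw: str) -> tuple[str, bool]:
--     """Insert or replace the managed Codex MCP block.
--
--     Returns:
--         Tuple of (updated_contents, existed_before).
--     """
--     section_lines = _CODEX_MCP_SECTION.strip("\n").splitlines()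
--     input_lines = raw.splitlines()
--     output_lines: list[str] = []
--     index = 0
--     existed_before = False
--     inserted = False
--
--     while index < len(input_lines):
--         stripped = input_lines[index].strip()
--         if _is_codex_mobius_table_header(stripped):
--             existed_before = True
--             if not inserted:
--                 _trim_managed_codex_comments(output_lines)
--                 if output_lines and output_lines[-1].strip():
--                     output_lines.append("")
--                 output_lines.extend(section_lines)
--                 inserted = True
--
--             index += 1
--             while index < len(input_lines):
--                 next_stripped = input_lines[index].strip()
--                 is_table_header = next_stripped.startswith("[") and next_stripped.endswith("]")
--                 if is_table_header and not _is_codex_mobius_table_header(next_stripped):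
--                     break
--                 index += 1
--             continue
--
--         output_lines.append(input_lines[index])
--         index += 1
--
--     if not inserted:
--         if output_lines and output_lines[-1].strip():
--             output_lines.append("")
--         output_lines.extend(section_lines)
--
--     return "\n".join(output_lines).rstrip() + "\n", existed_before
-- ===== SOURCE B (Python) =====
-- _CODEX_MCP_SECTION = """# Mobius MCP hookup for Codex CLI.
-- # Keep Mobius runtime settings and per-role model overrides in
-- # ~/.mobius/config.yaml (for example: clarification.default_model,
-- # llm.qa_model, evaluation.semantic_model, consensus.*).
-- # This file is only for the Codex MCP/env registration block.
--
-- [mcp_servers.mobius]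
-- command = "uvx"
-- args = ["--from", "mobius-ai", "mobius", "mcp", "serve"]
--
-- [mcp_servers.mobius.env]
-- MOBIUS_AGENT_RUNTIME = "codex"
-- MOBIUS_LLM_BACKEND = "codex"
-- """
--
-- _CODEX_MCP_COMMENT_LINES = (
--     "# Mobius MCP hookup for Codex CLI.",
--     "# Keep Mobius runtime settings and per-role model overrides in",
--     "# ~/.mobius/config.yaml (for example: clarification.default_model,",
--     "# llm.qa_model, evaluation.semantic_model, consensus.*).",
--     "# This file is only for the Codex MCP/env registration block.",
-- )
--
--
-- def _is_codex_mobius_table_header(line):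
--     return line == "[mcp_servers.mobius]" or line.startswith("[mcp_servers.mobius.")
--
--
-- def _is_boundary(line):
--     stripped = line.strip()
--     return _is_codex_mobius_table_header(stripped) or (
--         stripped.startswith("[") and stripped.endswith("]")
--     )
--
--
-- def _without_managed_comment_tail(lines):
--     """Pure variant of the comment trim: drop trailing blanks, then the
--     managed comment block if it is exactly the remaining suffix."""
--     n = len(lines)
--     while n and not lines[n - 1].strip():
--         n -= 1
--     k = len(_CODEX_MCP_COMMENT_LINES)
--     if n >= k and tuple(lines[n - k:n]) == _CODEX_MCP_COMMENT_LINES: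
--         n -= k
--     return lines[:n]
--
--
-- def _upsert_codex_mcp_section(raw):
--     section_lines = _CODEX_MCP_SECTION.strip("\n").splitlines()
--
--     # Partition the input into a preamble plus chunks, each chunk starting
--     # at a boundary line (managed header or any bracketed top-level header).
--     preamble = []
--     chunks = []  # list of [managed?, lines]
--     for line in raw.splitlines():
--         if _is_boundary(line):
--             chunks.append([_is_codex_mobius_table_header(line.strip()), [line]])
--         elif chunks:
--             chunks[-1][1].append(line)
--         else:
--             preamble.append(line)
--
--     existed_before = any(managed for managed, _ in chunks)
--
--     # Keep the preamble and every non-managed chunk; at the first managed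
--     # chunk trim the managed comment tail and remember the splice point.
--     out = list(preamble)
--     insert_at = None
--     for managed, body in chunks:
--         if managed:
--             if insert_at is None:
--                 out = _without_managed_comment_tail(out)
--                 insert_at = len(out)
--         else:
--             out.extend(body)
--
--     if insert_at is None:
--         if out and out[-1].strip():
--             out.append("")
--         out.extend(section_lines)
--     else:
--         sep = [""] if insert_at > 0 and out[insert_at - 1].strip() else []
--         out[insert_at:insert_at] = sep + section_lines
--
--     return "\n".join(out).rstrip() + "\n", existed_before
-- ===== Notes on version B (the rewrite author's own statement) =====
-- stated objective: alternative
-- what changed: A streams line-by-line with an inner skipping while-loop and inserts the section mid-stream; B first partitions the input into a preamble plus header-delimited chunks tagged managed/unmanaged, keeps the unmanaged ones, records a splice index at the first managed chunk, and splices the canonical section in at the end.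
import Mathlib
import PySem

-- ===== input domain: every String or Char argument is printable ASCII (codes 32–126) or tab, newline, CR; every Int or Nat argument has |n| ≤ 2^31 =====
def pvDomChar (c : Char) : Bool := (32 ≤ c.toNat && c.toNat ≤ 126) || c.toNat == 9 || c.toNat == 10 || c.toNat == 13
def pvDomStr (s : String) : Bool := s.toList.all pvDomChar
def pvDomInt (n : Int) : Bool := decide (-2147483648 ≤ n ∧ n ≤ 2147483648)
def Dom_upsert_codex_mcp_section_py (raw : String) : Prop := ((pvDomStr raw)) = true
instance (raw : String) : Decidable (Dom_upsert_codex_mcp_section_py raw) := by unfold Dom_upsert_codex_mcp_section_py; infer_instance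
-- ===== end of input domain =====

-- B re-decomposes A's streaming upsert as: partition into header-delimited chunks, keep the
-- unmanaged ones, splice the canonical section at the first managed chunk. Alternative
-- decomposition, same cost; return value proved equal on all inputs.

-- ===== PORT A =====
-- module constant _CODEX_MCP_SECTION
def pvSectionText : String := "# Mobius MCP hookup for Codex CLI.\n# Keep Mobius runtime settings and per-role model overrides in\n# ~/.mobius/config.yaml (for example: clarification.default_model,\n# llm.qa_model, evaluation.semantic_model, consensus.*).\n# This file is only for the Codex MCP/env registration block.\n\n[mcp_servers.mobius]\ncommand = \"uvx\"\nargs = [\"--from\", \"mobius-ai\", \"mobius\", \"mcp\", \"serve\"]\n\n[mcp_servers.mobius.env]\nMOBIUS_AGENT_RUNTIME = \"codex\"\nMOBIUS_LLM_BACKEND = \"codex\"\n"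

-- module constant _CODEX_MCP_COMMENT_LINES
def pvCommentLines : List String :=
  [ "# Mobius MCP hookup for Codex CLI.",
    "# Keep Mobius runtime settings and per-role model overrides in",
    "# ~/.mobius/config.yaml (for example: clarification.default_model,",
    "# llm.qa_model, evaluation.semantic_model, consensus.*).",
    "# This file is only for the Codex MCP/env registration block." ]

-- _is_codex_mobius_table_header
def pvIsCodexHeader (line : String) : Bool :=
  line == "[mcp_servers.mobius]" || PySem.Str.startswith line "[mcp_servers.mobius."

-- _CODEX_MCP_SECTION.strip("\n").splitlines()
def pvSectionLines : List String := PySem.Str.splitlines (PySem.Str.stripChars pvSectionText "\n")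

-- 'xs and xs[-1].strip()' (truthiness of the last line's strip)
def pvLastNonblank (lines : List String) : Bool :=
  match lines.getLast? with
  | some x => !(PySem.Str.strip x == "")
  | none => false

-- 'while lines and not lines[-1].strip(): lines.pop()'
def pvPopBlanks (lines : List String) : List String :=
  if h : lines = [] then lines
  else if PySem.Str.strip (lines.getLast h) == "" then pvPopBlanks lines.dropLast
  else lines
termination_by lines.length
decreasing_by have := List.length_pos_of_ne_nil h; simp [List.length_dropLast]; omega

-- 'for expected in reversed(_CODEX_MCP_COMMENT_LINES): if ci == 0 or lines[ci-1] != expected: return; ci -= 1'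
-- (some ci = all matched, delete lines[ci:]; none = early return, no deletion)
def pvCommentScan (lines : List String) : List String → Nat → Option Nat
  | [], ci => some ci
  | e :: rest, ci =>
      if ci = 0 ∨ ¬ (lines.getD (ci - 1) "" = e) then none
      else pvCommentScan lines rest (ci - 1)

-- _trim_managed_codex_comments (as a pure function on the mutated list)
def pvTrimComments (lines : List String) : List String :=
  let p := pvPopBlanks lines
  match pvCommentScan p pvCommentLines.reverse p.length with
  | none => p
  | some ci => p.take ci

-- the inner 'while index < len(input_lines): … break … index += 1' skip loop
def pvSkipManaged (ls : List String) : List String :=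
  ls.dropWhile (fun l =>
    let s := PySem.Str.strip l
    !(PySem.Str.startswith s "[" && PySem.Str.endswith s "]" && !pvIsCodexHeader s))

-- the outer while loop of _upsert_codex_mcp_section
def pvALoop : List String → List String → Bool → Bool → List String × Bool × Bool
  | [], out, existed, inserted => (out, existed, inserted)
  | l :: rest, out, existed, inserted =>
      if pvIsCodexHeader (PySem.Str.strip l) then
        let out' :=
          if inserted then out
          else
            let t := pvTrimComments out
            (if pvLastNonblank t then t ++ [""] else t) ++ pvSectionLines
        pvALoop (pvSkipManaged rest) out' true true
      else pvALoop rest (out ++ [l]) existed inserted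
termination_by ls => ls.length
decreasing_by
  · exact Nat.lt_succ_of_le (List.length_dropWhile_le _ _)
  · simp

def upsert_codex_mcp_section_py (raw : String) : String × Bool :=
  match pvALoop (PySem.Str.splitlines raw) [] false false with
  | (out, existed, inserted) =>
      (PySem.Str.rstrip (PySem.Str.join "\n"
        (if inserted then out
         else (if pvLastNonblank out then out ++ [""] else out) ++ pvSectionLines)) ++ "\n",
       existed)

-- ===== PORT B =====
-- _is_boundary
def pvIsBoundary (line : String) : Bool :=
  let s := PySem.Str.strip line
  pvIsCodexHeader s || (PySem.Str.startswith s "[" && PySem.Str.endswith s "]")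

-- 'n = len(lines); while n and not lines[n-1].strip(): n -= 1'
def pvBlankTailLen (lines : List String) : Nat → Nat
  | 0 => 0
  | n + 1 =>
      if PySem.Str.strip (lines.getD n "") == "" then pvBlankTailLen lines n
      else n + 1

-- _without_managed_comment_tail
def pvWithoutTail (lines : List String) : List String :=
  let n := pvBlankTailLen lines lines.length
  let k := pvCommentLines.length
  let n' := if k ≤ n && (PySem.List.slice lines (some ((n - k : Nat) : Int)) (some ((n : Nat) : Int)) == pvCommentLines) then n - k else n
  lines.take n'

-- the chunk-building pass of B (right fold over the lines)
def pvSplitChunks : List String → List String × List (Bool × List String)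
  | [] => ([], [])
  | l :: rest =>
      let pc := pvSplitChunks rest
      if pvIsBoundary l then
        ([], (pvIsCodexHeader (PySem.Str.strip l), l :: pc.1) :: pc.2)
      else (l :: pc.1, pc.2)

-- B's chunk-filtering loop: keep unmanaged chunks, record splice index at the first managed one
def pvProcessChunks : List (Bool × List String) → List String → Option Nat → List String × Option Nat
  | [], out, ia => (out, ia)
  | (m, body) :: cs, out, ia =>
      if m then
        match ia with
        | none => let t := pvWithoutTail out; pvProcessChunks cs t (some t.length)
        | some i => pvProcessChunks cs out (some i)
      else pvProcessChunks cs (out ++ body) ia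

def upsert_codex_mcp_section_py_alt (raw : String) : String × Bool :=
  match pvProcessChunks (pvSplitChunks (PySem.Str.splitlines raw)).2
      (pvSplitChunks (PySem.Str.splitlines raw)).1 none with
  | (out, ia) =>
      (PySem.Str.rstrip (PySem.Str.join "\n"
        (match ia with
         | none => (if pvLastNonblank out then out ++ [""] else out) ++ pvSectionLines
         | some i =>
             out.take i ++
               ((if 0 < i && !(PySem.Str.strip (out.getD (i - 1) "") == "") then [""] else []) ++
                 pvSectionLines) ++ out.drop i)) ++ "\n",
       (pvSplitChunks (PySem.Str.splitlines raw)).2.any (fun c => c.1))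

-- ===== PRECONDITION & SPEC =====
def Spec_upsert_codex_mcp_section_py (raw : String) (out : String × Bool) : Prop := out = upsert_codex_mcp_section_py_alt raw
instance (raw : String) (out : String × Bool) : Decidable (Spec_upsert_codex_mcp_section_py raw out) := by unfold Spec_upsert_codex_mcp_section_py; infer_instance

-- ===== CLAIM (what is proved, stated in full; the proofs are below) =====
def Claim_equal_upsert_codex_mcp_section_py : Prop := ∀ (raw : String), Dom_upsert_codex_mcp_section_py raw → Spec_upsert_codex_mcp_section_py raw (upsert_codex_mcp_section_py raw)

-- ===== LEMMAS AND PROOFS =====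

-- abbreviations for the three line classifications both programs use
def pvM (l : String) : Bool := pvIsCodexHeader (PySem.Str.strip l)
def pvH (l : String) : Bool :=
  PySem.Str.startswith (PySem.Str.strip l) "[" && PySem.Str.endswith (PySem.Str.strip l) "]"
def pvCont (l : String) : Bool := !(pvH l && !pvM l)
def pvNB (l : String) : Bool := !pvIsBoundary l

theorem pv_skip_eq (ls : List String) : pvSkipManaged ls = ls.dropWhile pvCont := rfl

theorem pv_bnd_eq (l : String) : pvIsBoundary l = (pvM l || pvH l) := rfl

theorem pv_not_bnd_M (l : String) (h : pvIsBoundary l = false) : pvM l = false := by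
  rw [pv_bnd_eq] at h; cases hm : pvM l <;> simp_all

theorem pv_cont_of_not_bnd (l : String) (h : pvIsBoundary l = false) : pvCont l = true := by
  rw [pv_bnd_eq] at h; unfold pvCont; cases hm : pvM l <;> cases hh : pvH l <;> simp_all

theorem pv_cont_of_M (l : String) (h : pvM l = true) : pvCont l = true := by
  unfold pvCont; simp [h]

theorem pv_not_cont (l : String) (hm : pvM l = false) (hb : pvIsBoundary l = true) :
    pvCont l = false := by
  rw [pv_bnd_eq] at hb; unfold pvCont; cases hh : pvH l <;> simp_all

theorem pv_dropWhile_dropWhile (p q : String → Bool) (ls : List String)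
    (h : ∀ x, q x = true → p x = true) : ls.dropWhile p = (ls.dropWhile q).dropWhile p := by
  induction ls with
  | nil => rfl
  | cons a t ih =>
    by_cases hq : q a = true
    · simp [hq, h a hq, ih]
    · simp [List.dropWhile_cons, hq]

theorem pv_dropWhile_head (p : String → Bool) (ls t : List String) (b : String)
    (h : ls.dropWhile p = b :: t) : p b = false := by
  have h2 : (ls.dropWhile p) ≠ [] := by simp [h]
  have := List.head_dropWhile_not p (l := ls) h2
  have hb : (ls.dropWhile p).head h2 = b := by simp [h]
  rwa [hb] at this

-- lines kept by A's loop once the section has been inserted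
def pvKeep : List String → List String
  | [] => []
  | l :: rest => if pvM l then pvKeep (pvSkipManaged rest) else l :: pvKeep rest
termination_by ls => ls.length
decreasing_by
  · exact Nat.lt_succ_of_le (List.length_dropWhile_le _ _)
  · simp

-- lines kept by B's chunk filter, expressed directly on the line list
def pvKeepB : List String → List String
  | [] => []
  | l :: rest =>
      if pvM l then pvKeepB (rest.dropWhile pvNB)
      else if pvIsBoundary l then l :: (rest.takeWhile pvNB ++ pvKeepB (rest.dropWhile pvNB))
      else l :: pvKeepB rest
termination_by ls => ls.length
decreasing_by
  · exact Nat.lt_succ_of_le (List.length_dropWhile_le _ _)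
  · exact Nat.lt_succ_of_le (List.length_dropWhile_le _ _)
  · simp

theorem pv_keepB_split (ls : List String) :
    pvKeepB ls = ls.takeWhile pvNB ++ pvKeepB (ls.dropWhile pvNB) := by
  induction ls with
  | nil => rfl
  | cons l rest ih =>
    by_cases hb : pvIsBoundary l = true
    · have : pvNB l = false := by simp [pvNB, hb]
      simp [List.takeWhile_cons, List.dropWhile_cons, this]
    · have hnb : pvIsBoundary l = false := by simpa using hb
      have hm := pv_not_bnd_M l hnb
      have : pvNB l = true := by simp [pvNB, hnb]
      rw [pvKeepB]
      simp [hm, hnb, List.takeWhile_cons, List.dropWhile_cons, this, ih]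

theorem pv_keep_eq_keepB_aux (n : Nat) : ∀ ls : List String, ls.length ≤ n →
    pvKeep ls = pvKeepB ls ∧ pvKeep (pvSkipManaged ls) = pvKeepB (ls.dropWhile pvNB) := by
  induction n with
  | zero =>
    intro ls h
    have : ls = [] := List.eq_nil_of_length_eq_zero (Nat.le_zero.mp h)
    subst this; exact ⟨by rw [pvKeep, pvKeepB], by rw [pv_skip_eq]; simp; rw [pvKeep, pvKeepB]⟩
  | succ n ih =>
    intro ls hlen
    constructor
    · -- part 1
      match ls with
      | [] => rw [pvKeep, pvKeepB]
      | l :: rest =>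
        have hr : rest.length ≤ n := by simp at hlen; omega
        by_cases hm : pvM l = true
        · rw [pvKeep, pvKeepB]; simp only [hm, if_pos]
          exact (ih rest hr).2
        · have hm' : pvM l = false := by simpa using hm
          rw [pvKeep, pvKeepB]
          simp only [hm', Bool.false_eq_true, if_false, if_neg]
          by_cases hb : pvIsBoundary l = true
          · simp only [hb, if_pos]
            rw [(ih rest hr).1, pv_keepB_split rest]
          · have hnb : pvIsBoundary l = false := by simpa using hb
            simp only [hnb, Bool.false_eq_true, if_false]
            rw [(ih rest hr).1]
    · -- part 2
      rw [pv_skip_eq, pv_dropWhile_dropWhile pvCont pvNB ls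
        (fun x hx => pv_cont_of_not_bnd x (by simpa [pvNB] using hx))]
      cases hds : ls.dropWhile pvNB with
      | nil => simp only [List.dropWhile_nil]; rw [pvKeep, pvKeepB]
      | cons b t =>
        have hbnd : pvIsBoundary b = true := by
          have := pv_dropWhile_head pvNB ls t b hds
          simpa [pvNB] using this
        have ht : t.length ≤ n := by
          have h1 : (ls.dropWhile pvNB).length ≤ ls.length := List.length_dropWhile_le _ _
          rw [hds] at h1; simp at h1; omega
        by_cases hm : pvM b = true
        · rw [pvKeepB]
          simp only [hm, if_pos]
          rw [List.dropWhile_cons, if_pos (pv_cont_of_M b hm)]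
          have := (ih t ht).2
          rwa [pv_skip_eq] at this
        · have hm' : pvM b = false := by simpa using hm
          rw [List.dropWhile_cons, if_neg (by simp [pv_not_cont b hm' hbnd])]
          rw [pvKeep, pvKeepB]
          simp only [hm', Bool.false_eq_true, if_false, hbnd, if_pos]
          rw [(ih t ht).1, pv_keepB_split t]

theorem pv_keep_skip (ls : List String) :
    pvKeep (pvSkipManaged ls) = pvKeepB (ls.dropWhile pvNB) :=
  (pv_keep_eq_keepB_aux ls.length ls le_rfl).2

-- the lines contributed by a chunk list under B's filter
def pvChunkKeep : List (Bool × List String) → List String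
  | [] => []
  | c :: cs => if c.1 then pvChunkKeep cs else c.2 ++ pvChunkKeep cs

theorem pv_split_pre (ls : List String) : (pvSplitChunks ls).1 = ls.takeWhile pvNB := by
  induction ls with
  | nil => rfl
  | cons l rest ih =>
    rw [pvSplitChunks]
    by_cases hb : pvIsBoundary l = true
    · simp [hb, List.takeWhile_cons, pvNB]
    · have hnb : pvIsBoundary l = false := by simpa using hb
      simp [hnb, List.takeWhile_cons, pvNB, ih]

theorem pv_chunkKeep_split (ls : List String) :
    pvChunkKeep (pvSplitChunks ls).2 = pvKeepB (ls.dropWhile pvNB) := by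
  induction ls with
  | nil => simp [pvSplitChunks]; rw [pvChunkKeep, pvKeepB]
  | cons l rest ih =>
    rw [pvSplitChunks]
    by_cases hb : pvIsBoundary l = true
    · have hnb : pvNB l = false := by simp [pvNB, hb]
      rw [List.dropWhile_cons, hnb]
      simp only [Bool.false_eq_true, if_false]
      rw [if_pos hb]
      by_cases hm : pvM l = true
      · have hc : pvIsCodexHeader (PySem.Str.strip l) = true := hm
        rw [hc]
        simp only [pvChunkKeep, if_pos]
        rw [pvKeepB, if_pos hm, ih]
      · have hm' : pvM l = false := by simpa using hm
        have hc : pvIsCodexHeader (PySem.Str.strip l) = false := hm'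
        rw [hc]
        simp only [pvChunkKeep, Bool.false_eq_true, if_false]
        rw [pvKeepB]
        simp only [hm', Bool.false_eq_true, if_false, hb, if_pos]
        rw [ih, pv_split_pre]
        simp
    · have hnb : pvIsBoundary l = false := by simpa using hb
      have hnb' : pvNB l = true := by simp [pvNB, hnb]
      rw [List.dropWhile_cons, if_pos hnb']
      simp [hnb, ih]

theorem pv_split_any (ls : List String) :
    (pvSplitChunks ls).2.any (fun c => c.1) = ls.any pvM := by
  induction ls with
  | nil => rfl
  | cons l rest ih =>
    rw [pvSplitChunks]
    by_cases hb : pvIsBoundary l = true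
    · simp only [hb, if_pos]
      simp [List.any_cons, ih]
      rfl
    · have hnb : pvIsBoundary l = false := by simpa using hb
      have hm := pv_not_bnd_M l hnb
      simp [hnb, List.any_cons, hm, ih]

-- A inserts this block in front of the trimmed prefix
def pvIns (t : List String) : List String :=
  (if pvLastNonblank t then t ++ [""] else t) ++ pvSectionLines

-- A's loop in the already-inserted phase appends exactly the kept lines
theorem pv_aloop_inserted (n : Nat) : ∀ ls : List String, ls.length ≤ n →
    ∀ (out : List String) (ex : Bool),
    pvALoop ls out ex true = (out ++ pvKeep ls, ex || ls.any pvM, true) := by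
  induction n with
  | zero =>
    intro ls h out ex
    have : ls = [] := List.eq_nil_of_length_eq_zero (Nat.le_zero.mp h)
    subst this; simp [pvALoop, pvKeep]
  | succ n ih =>
    intro ls hlen out ex
    match ls with
    | [] => simp [pvALoop, pvKeep]
    | l :: rest =>
      have hr : rest.length ≤ n := by simp at hlen; omega
      by_cases hm : pvM l = true
      · rw [pvALoop]
        have : pvIsCodexHeader (PySem.Str.strip l) = true := hm
        simp only [this, if_pos, if_true]
        rw [ih (pvSkipManaged rest) (le_trans (by rw [pv_skip_eq]; exact List.length_dropWhile_le _ _) hr) out true]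
        rw [pvKeep, if_pos hm]
        simp [List.any_cons, hm]
      · have hm' : pvM l = false := by simpa using hm
        rw [pvALoop]
        have : pvIsCodexHeader (PySem.Str.strip l) = false := hm'
        simp only [this, Bool.false_eq_true, if_false]
        rw [ih rest hr (out ++ [l]) ex]
        rw [pvKeep]
        simp [hm', List.any_cons]

-- characterisation of A's loop from the initial (not yet inserted) state
theorem pv_aloop_char : ∀ (ls out : List String) (ex : Bool),
    pvALoop ls out ex false =
      if ls.any pvM then
        (pvIns (pvTrimComments (out ++ ls.takeWhile (fun l => !pvM l))) ++
           pvKeep (pvSkipManaged ((ls.dropWhile (fun l => !pvM l)).tail)), true, true)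
      else (out ++ ls, ex, false) := by
  intro ls
  induction ls with
  | nil => intro out ex; simp [pvALoop]
  | cons l rest ih =>
    intro out ex
    by_cases hm : pvM l = true
    · rw [pvALoop]
      have hc : pvIsCodexHeader (PySem.Str.strip l) = true := hm
      simp only [hc, if_pos, Bool.false_eq_true, if_false]
      rw [pv_aloop_inserted (pvSkipManaged rest).length (pvSkipManaged rest) le_rfl]
      simp [List.any_cons, hm, List.takeWhile_cons, List.dropWhile_cons, pvIns]
    · have hm' : pvM l = false := by simpa using hm
      rw [pvALoop]
      have hc : pvIsCodexHeader (PySem.Str.strip l) = false := hm'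
      simp only [hc, Bool.false_eq_true, if_false]
      rw [ih (out ++ [l]) ex]
      simp [List.any_cons, hm', List.takeWhile_cons, List.dropWhile_cons]

theorem pv_proc_some (cs : List (Bool × List String)) : ∀ (out : List String) (i : Nat),
    pvProcessChunks cs out (some i) = (out ++ pvChunkKeep cs, some i) := by
  induction cs with
  | nil => intro out i; simp [pvProcessChunks, pvChunkKeep]
  | cons c cs ih =>
    intro out i
    obtain ⟨m, body⟩ := c
    rw [pvProcessChunks, pvChunkKeep]
    by_cases hm : m = true
    · simp [hm, ih]
    · have : m = false := by simpa using hm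
      simp [this, ih]

-- the two comment-trimming implementations agree
theorem pv_btl_le (xs : List String) : ∀ m, pvBlankTailLen xs m ≤ m := by
  intro m
  induction m with
  | zero => simp [pvBlankTailLen]
  | succ k ih =>
    rw [pvBlankTailLen]
    split_ifs with h
    · omega
    · omega

theorem pv_btl_dropLast (xs : List String) : ∀ m, m ≤ xs.length - 1 →
    pvBlankTailLen xs m = pvBlankTailLen xs.dropLast m := by
  intro m
  induction m with
  | zero => intro _; rfl
  | succ k ih =>
    intro hm
    rw [pvBlankTailLen, pvBlankTailLen]
    have hget : xs.getD k "" = xs.dropLast.getD k "" := by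
      rw [List.getD_eq_getElem _ _ (by omega), List.getD_eq_getElem _ _ (by simp [List.length_dropLast]; omega)]
      exact (List.getElem_dropLast _).symm
    rw [hget, ih (by omega)]

theorem pv_pop_eq_take (n : Nat) : ∀ xs : List String, xs.length ≤ n →
    pvPopBlanks xs = xs.take (pvBlankTailLen xs xs.length) := by
  induction n with
  | zero =>
    intro xs h
    have : xs = [] := List.eq_nil_of_length_eq_zero (Nat.le_zero.mp h)
    subst this
    rw [pvPopBlanks]
    simp [pvBlankTailLen]
  | succ n ih =>
    intro xs hlen
    by_cases hnil : xs = []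
    · subst hnil; rw [pvPopBlanks]; simp [pvBlankTailLen]
    · have hpos := List.length_pos_of_ne_nil hnil
      obtain ⟨k, hk⟩ : ∃ k, xs.length = k + 1 := ⟨xs.length - 1, by omega⟩
      rw [pvPopBlanks, dif_neg hnil, hk, pvBlankTailLen]
      have hgl : xs.getD k "" = xs.getLast hnil := by
        rw [List.getD_eq_getElem _ _ (by omega), List.getLast_eq_getElem hnil]
        congr 1; omega
      rw [hgl]
      by_cases hb : (PySem.Str.strip (xs.getLast hnil) == "") = true
      · rw [if_pos hb, if_pos hb]
        rw [ih xs.dropLast (by simp [List.length_dropLast]; omega)]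
        have hdl : xs.dropLast.length = k := by simp [List.length_dropLast]; omega
        rw [hdl, ← pv_btl_dropLast xs k (by omega)]
        rw [List.dropLast_eq_take, List.take_take]
        congr 1
        have := pv_btl_le xs k
        omega
      · have hb' : ¬ (PySem.Str.strip (xs.getLast hnil) == "") = true := hb
        rw [if_neg hb', if_neg hb', ← hk, List.take_length]

theorem pv_scan_suffix (lines : List String) : ∀ (exp : List String) (ci : Nat), ci ≤ lines.length →
    pvCommentScan lines exp ci =
      if exp.length ≤ ci ∧ (lines.drop (ci - exp.length)).take exp.length = exp.reverse
      then some (ci - exp.length) else none := by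
  intro exp
  induction exp with
  | nil =>
    intro ci hci
    simp [pvCommentScan]
  | cons e rest ih =>
    intro ci hci
    rw [pvCommentScan]
    by_cases h0 : ci = 0
    · subst h0
      rw [if_pos (Or.inl rfl), if_neg]
      rintro ⟨h1, -⟩
      simp at h1
    · obtain ⟨j, rfl⟩ : ∃ j, ci = j + 1 := ⟨ci - 1, by omega⟩
      have hj : j < lines.length := by omega
      have hgd : lines.getD (j + 1 - 1) "" = lines[j] := by
        rw [show j + 1 - 1 = j from rfl, List.getD_eq_getElem _ _ hj]
      by_cases he : lines.getD (j + 1 - 1) "" = e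
      · rw [if_neg (by push_neg; exact ⟨h0, he⟩)]
        rw [show j + 1 - 1 = j from rfl, ih j (by omega)]
        by_cases hlen : rest.length ≤ j
        · have harith : j + 1 - (rest.length + 1) = j - rest.length := by omega
          have hexp : (lines.drop (j - rest.length)).take (rest.length + 1)
              = (lines.drop (j - rest.length)).take rest.length ++ [lines[j]] := by
            rw [List.take_add_one, List.getElem?_drop]
            rw [show j - rest.length + rest.length = j from by omega]
            rw [List.getElem?_eq_getElem hj]
            rfl
          have hcond : ((e :: rest).length ≤ j + 1 ∧
              (lines.drop (j + 1 - (e :: rest).length)).take (e :: rest).length = (e :: rest).reverse)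
              ↔ (rest.length ≤ j ∧ (lines.drop (j - rest.length)).take rest.length = rest.reverse) := by
            simp only [List.length_cons, harith, hexp, List.reverse_cons, List.append_singleton_inj]
            constructor
            · rintro ⟨-, h2, -⟩; exact ⟨hlen, h2⟩
            · rintro ⟨-, h2⟩
              refine ⟨by omega, h2, ?_⟩
              rw [← hgd, he]
          rw [if_congr hcond rfl rfl]
          simp only [List.length_cons, harith]
        · rw [if_neg (by rintro ⟨h1, -⟩; omega), if_neg (by rintro ⟨h1, -⟩; simp at h1; omega)]
      · rw [if_pos (Or.inr he), if_neg]
        rintro ⟨h1, h2⟩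
        simp only [List.length_cons] at h1 h2
        have hlen : rest.length ≤ j := by omega
        have hexp : (lines.drop (j - rest.length)).take (rest.length + 1)
            = (lines.drop (j - rest.length)).take rest.length ++ [lines[j]] := by
          rw [List.take_add_one, List.getElem?_drop]
          rw [show j - rest.length + rest.length = j from by omega]
          rw [List.getElem?_eq_getElem hj]
          rfl
        rw [show j + 1 - (rest.length + 1) = j - rest.length from by omega, hexp,
          List.reverse_cons] at h2
        have := (List.append_singleton_inj.mp h2).2
        rw [hgd] at he
        exact he this

theorem pv_trim_eq (xs : List String) : pvTrimComments xs = pvWithoutTail xs := by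
  unfold pvTrimComments pvWithoutTail
  simp only []
  rw [pv_pop_eq_take xs.length xs le_rfl]
  rw [show pvCommentLines.length = 5 from rfl]
  have hnle : pvBlankTailLen xs xs.length ≤ xs.length := pv_btl_le xs xs.length
  generalize hgen : pvBlankTailLen xs xs.length = n at hnle ⊢
  have hplen : (xs.take n).length = n := by simp [hnle]
  rw [hplen]
  rw [pv_scan_suffix (xs.take n) pvCommentLines.reverse n (by rw [hplen])]
  simp only [List.length_reverse, show pvCommentLines.reverse.length = 5 from rfl,
    List.reverse_reverse]
  by_cases h5 : 5 ≤ n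
  · obtain ⟨m, rfl⟩ : ∃ m, n = m + 5 := ⟨n - 5, by omega⟩
    have harr : m + 5 - 5 = m := by omega
    have hseq : ((xs.take (m + 5)).drop m).take 5 = (xs.drop m).take 5 := by
      rw [List.drop_take, show m + 5 - m = 5 from by omega, List.take_take, Nat.min_self]
    rw [PySem.List.slice_natCast, harr, show m + 5 - m = 5 from by omega]
    by_cases hEq : (xs.drop m).take 5 = pvCommentLines
    · rw [if_pos ⟨by omega, by rw [hseq]; exact hEq⟩]
      have hbeq : ((xs.drop m).take 5 == pvCommentLines) = true := by
        rw [beq_iff_eq]; exact hEq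
      rw [show (decide (5 ≤ m + 5)) = true from by simp, hbeq]
      simp only [Bool.and_self, if_pos]
      rw [List.take_take, Nat.min_eq_left (by omega)]
    · rw [if_neg (by rintro ⟨-, h2⟩; rw [hseq] at h2; exact hEq h2)]
      have hbeq : ((xs.drop m).take 5 == pvCommentLines) = false := by
        rw [beq_eq_false_iff_ne]; exact hEq
      rw [hbeq]
      simp
  · rw [if_neg (by rintro ⟨h1, -⟩; omega)]
    rw [show (decide (5 ≤ n)) = false from by simp; omega]
    simp

-- characterisation of B's chunk processing
theorem pv_proc_char : ∀ (ls acc : List String),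
    pvProcessChunks (pvSplitChunks ls).2 (acc ++ (pvSplitChunks ls).1) none =
      if ls.any pvM then
        (pvWithoutTail (acc ++ ls.takeWhile (fun l => !pvM l)) ++
           pvKeep (pvSkipManaged ((ls.dropWhile (fun l => !pvM l)).tail)),
         some (pvWithoutTail (acc ++ ls.takeWhile (fun l => !pvM l))).length)
      else (acc ++ ls, none) := by
  intro ls
  induction ls with
  | nil => intro acc; simp [pvSplitChunks, pvProcessChunks]
  | cons l rest ih =>
    intro acc
    rw [pvSplitChunks]
    by_cases hm : pvM l = true
    · have hb : pvIsBoundary l = true := by rw [pv_bnd_eq]; simp [hm]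
      have hc : pvIsCodexHeader (PySem.Str.strip l) = true := hm
      simp only [hb, if_pos, hc]
      rw [pvProcessChunks]
      simp only [if_pos rfl]
      rw [pv_proc_some, pv_chunkKeep_split, ← pv_keep_skip]
      simp [List.any_cons, hm, List.takeWhile_cons, List.dropWhile_cons]
    · have hm' : pvM l = false := by simpa using hm
      by_cases hb : pvIsBoundary l = true
      · have hc : pvIsCodexHeader (PySem.Str.strip l) = false := hm'
        simp only [hb, if_pos, hc]
        rw [pvProcessChunks]
        simp only [Bool.false_eq_true, if_false]
        rw [pv_split_pre]
        have step : acc ++ [] ++ (l :: rest.takeWhile pvNB) = (acc ++ [l]) ++ rest.takeWhile pvNB := by simp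
        rw [step, ← pv_split_pre, ih (acc ++ [l])]
        simp [List.any_cons, hm', List.takeWhile_cons, List.dropWhile_cons]
      · have hnb : pvIsBoundary l = false := by simpa using hb
        simp only [hnb, Bool.false_eq_true, if_false]
        have step : acc ++ (l :: (pvSplitChunks rest).1) = (acc ++ [l]) ++ (pvSplitChunks rest).1 := by simp
        rw [step, ih (acc ++ [l])]
        simp [List.any_cons, hm', List.takeWhile_cons, List.dropWhile_cons]

theorem pv_main (raw : String) :
    upsert_codex_mcp_section_py raw = upsert_codex_mcp_section_py_alt raw := by
  unfold upsert_codex_mcp_section_py upsert_codex_mcp_section_py_alt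
  have hchar := pv_aloop_char (PySem.Str.splitlines raw) [] false
  have hproc := pv_proc_char (PySem.Str.splitlines raw) []
  simp only [List.nil_append] at hchar hproc
  set ls := PySem.Str.splitlines raw with hls
  by_cases hany : ls.any pvM = true
  · rw [if_pos hany] at hchar hproc
    rw [hchar, hproc, pv_split_any, hany]
    simp only [if_true]
    apply congrArg (fun o => (PySem.Str.rstrip (PySem.Str.join "\n" o) ++ "\n", true))
    rw [pv_trim_eq]
    set T := pvWithoutTail (ls.takeWhile (fun l => !pvM l)) with hT
    set K := pvKeep (pvSkipManaged ((ls.dropWhile (fun l => !pvM l)).tail)) with hK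
    rw [List.take_left' rfl, List.drop_left' rfl]
    by_cases hTnil : T = []
    · rw [hTnil]
      simp [pvIns, pvLastNonblank]
    · have hlen : 0 < T.length := List.length_pos_of_ne_nil hTnil
      have hget : (T ++ K).getD (T.length - 1) "" = T.getLast hTnil := by
        rw [List.getD_append _ _ _ _ (by omega)]
        rw [List.getD_eq_getElem _ _ (by omega)]
        exact (List.getLast_eq_getElem hTnil).symm
      have hlast : T.getLast? = some (T.getLast hTnil) := List.getLast?_eq_some_getLast hTnil
      rw [pvIns]
      unfold pvLastNonblank
      rw [hlast, hget]
      simp only [hlen, decide_true, Bool.true_and]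
      by_cases hnb : (PySem.Str.strip (T.getLast hTnil) == "") = true
      · simp [hnb]
      · have h2 : (PySem.Str.strip (T.getLast hTnil) == "") = false := by simpa using hnb
        simp [h2]
  · have hany' : ls.any pvM = false := by simpa using hany
    rw [if_neg (by simp [hany'])] at hchar hproc
    rw [hchar, hproc, pv_split_any, hany']
    simp only [Bool.false_eq_true, if_false]

-- ===== VERDICT (by name: the statement is the Claim_ definition above) =====
theorem upsert_codex_mcp_section_py_spec : Claim_equal_upsert_codex_mcp_section_py := by
  intro raw _
  unfold Spec_upsert_codex_mcp_section_py
  exact pv_main raw
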